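-- pv_equiv track=rewrite | github.com/abuxton/dotfiles | agents/.agents/skills/do-nothing-scripting/references/extract_commands.py | extract_via_input_events
-- ===== SOURCE A (Python) =====
-- def extract_via_input_events(events: list) -> list[str]:
--     """Reconstruct commands from "i" (stdin) events."""
--     buffer = ""
--     commands: list[str] = []
--     for event in events:
--         if len(event) != 3 or event[1] != "i":
--             continue
--         data: str = event[2]
--         for ch in data:
--             if ch in ("\r", "\n"):
--                 cmd = buffer.strip()
--                 if cmd:
--                     commands.append(cmd)
--                 buffer = ""
--             elif ch == "\x7f":  # backspace
--                 buffer = buffer[:-1]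
--             else:
--                 buffer += ch
--     if buffer.strip():
--         commands.append(buffer.strip())
--     return commands
-- ===== SOURCE B (Python) =====
-- def extract_via_input_events(events: list) -> list[str]:
--     """Reconstruct commands from "i" (stdin) events."""
--     stream = "".join(e[2] for e in events if len(e) == 3 and e[1] == "i")
--     commands: list[str] = []
--     for segment in stream.replace("\r", "\n").split("\n"):
--         acc = ""
--         for ch in segment:
--             acc = acc[:-1] if ch == "\x7f" else acc + ch
--         cmd = acc.strip()
--         if cmd:
--             commands.append(cmd)
--     return commands
-- ===== Notes on version B (the rewrite author's own statement) =====
-- stated objective: alternative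
-- what changed: Replaces A's single streaming per-character state machine (buffer+commands threaded through nested event/char loops with inline terminator handling) by a pipeline: concatenate all valid events' data into one string, normalize \r to \n, split on \n keeping empty segments, then reduce each segment independently (backspace = drop last) and keep the non-empty stripped results.
import Mathlib
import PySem

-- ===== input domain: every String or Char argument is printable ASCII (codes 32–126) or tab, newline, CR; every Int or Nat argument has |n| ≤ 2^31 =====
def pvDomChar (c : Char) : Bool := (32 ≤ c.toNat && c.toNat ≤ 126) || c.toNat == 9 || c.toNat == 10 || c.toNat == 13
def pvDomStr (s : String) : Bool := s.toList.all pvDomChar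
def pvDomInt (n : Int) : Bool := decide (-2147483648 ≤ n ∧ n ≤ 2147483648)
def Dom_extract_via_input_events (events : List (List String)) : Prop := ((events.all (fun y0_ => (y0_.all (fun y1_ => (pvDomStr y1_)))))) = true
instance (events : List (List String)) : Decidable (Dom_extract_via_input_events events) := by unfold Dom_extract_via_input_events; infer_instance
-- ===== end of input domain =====

-- B replaces A's streaming per-character state machine by a concatenate/normalize/split/per-segment-reduce
-- pipeline (alternative decomposition, same cost); both are total, return values agree everywhere.

-- ===== PORT A =====
-- Python str ↔ List Char; the buffer is a List Char, commands are collected as List (List Char)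
-- and turned into Strings at the return (same final conversion in both ports).
-- A's inner loop body: '\r'/'\n' flushes the stripped buffer, '\x7f' is buffer[:-1], else append.
def pvStepA (st : List Char × List (List Char)) (ch : Char) : List Char × List (List Char) :=
  if ch = '\r' ∨ ch = '\n' then
    let cmd := PySem.Chars.strip st.1
    ([], if cmd ≠ [] then st.2 ++ [cmd] else st.2)
  else if ch = '\x7f' then (st.1.dropLast, st.2)  -- buffer[:-1]
  else (st.1 ++ [ch], st.2)

def extract_via_input_events (events : List (List String)) : List String :=
  let st := events.foldl (fun st event =>
      if event.length ≠ 3 ∨ PySem.List.pyGet? event 1 ≠ some "i" then st  -- continue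
      else (((PySem.List.pyGet? event 2).getD "").toList).foldl pvStepA st)  -- getD unreachable: length = 3
    ([], [])
  let fin := PySem.Chars.strip st.1
  (if fin ≠ [] then st.2 ++ [fin] else st.2).map String.ofList

-- ===== PORT B =====
def pvStepB (acc : List Char) (ch : Char) : List Char :=
  if ch = '\x7f' then acc.dropLast else acc ++ [ch]

def extract_via_input_events_alt (events : List (List String)) : List String :=
  -- "".join(e[2] for e in events if len(e) == 3 and e[1] == "i")
  let stream := ((events.filter (fun e => decide (e.length = 3 ∧ PySem.List.pyGet? e 1 = some "i"))).map
      (fun e => ((PySem.List.pyGet? e 2).getD "").toList)).flatten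
  -- stream.replace("\r", "\n"): a single-char-for-single-char replace, exactly a character map
  -- .split("\n"): single-char separator split keeping empty segments, exactly List.splitOn '\n'
  let segs := List.splitOn '\n' (stream.map (fun c => if c = '\r' then '\n' else c))
  (segs.foldl (fun cmds seg =>
      let cmd := PySem.Chars.strip (seg.foldl pvStepB [])
      if cmd ≠ [] then cmds ++ [cmd] else cmds) []).map String.ofList

-- ===== PRECONDITION & SPEC =====
def Spec_extract_via_input_events (events : List (List String)) (out : List String) : Prop := out = extract_via_input_events_alt events
instance (events : List (List String)) (out : List String) : Decidable (Spec_extract_via_input_events events out) := by unfold Spec_extract_via_input_events; infer_instance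

-- ===== CLAIM (what is proved, stated in full; the proofs are below) =====
def Claim_equal_extract_via_input_events : Prop := ∀ (events : List (List String)), Dom_extract_via_input_events events → Spec_extract_via_input_events events (extract_via_input_events events)

-- ===== LEMMAS AND PROOFS =====

-- the flushed command of a buffer: [strip buf] if non-empty else []
def pvOpt (buf : List Char) : List (List Char) :=
  if PySem.Chars.strip buf ≠ [] then [PySem.Chars.strip buf] else []

-- B's per-segment processing, with an explicit carry-in buffer for the FIRST segment
def pvSegProc (buf : List Char) : List (List Char) → List (List Char)
  | [] => []
  | seg :: rest => pvOpt (seg.foldl pvStepB buf) ++ pvSegProc [] rest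

def pvRepl (c : Char) : Char := if c = '\r' then '\n' else c

-- the concatenated stream of valid events' data (the `stream` of port B)
def pvStream (events : List (List String)) : List Char :=
  ((events.filter (fun e => decide (e.length = 3 ∧ PySem.List.pyGet? e 1 = some "i"))).map
      (fun e => ((PySem.List.pyGet? e 2).getD "").toList)).flatten

theorem pv_go_acc (p : Char → Bool) (l : List Char) (acc : List Char) :
    List.splitOnP.go p l acc = (List.splitOnP.go p l []).modifyHead (acc.reverse ++ ·) := by
  induction l generalizing acc with
  | nil => simp [List.splitOnP.go]
  | cons a as ih =>
    simp only [List.splitOnP.go]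
    by_cases h : p a
    · simp [h]
    · simp only [h, Bool.false_eq_true, ite_false]
      rw [ih (a :: acc), ih [a]]
      cases hgo : List.splitOnP.go p as [] with
      | nil => simp
      | cons x xs => simp

theorem pv_splitOn_cons_sep (l : List Char) :
    List.splitOn '\n' ('\n' :: l) = [] :: List.splitOn '\n' l := by
  simp [List.splitOn, List.splitOnP, List.splitOnP.go]

theorem pv_splitOn_cons_ne (a : Char) (l : List Char) (h : ¬ a = '\n') :
    List.splitOn '\n' (a :: l) = (List.splitOn '\n' l).modifyHead (a :: ·) := by
  simp only [List.splitOn, List.splitOnP, List.splitOnP.go, beq_iff_eq, h, Bool.false_eq_true,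
    ite_false]
  rw [pv_go_acc]
  cases hgo : List.splitOnP.go (fun b => b == '\n') l [] with
  | nil => simp
  | cons x xs => simp

theorem pv_segProc_modifyHead (buf : List Char) (a : Char) (segs : List (List Char)) :
    pvSegProc buf (segs.modifyHead (a :: ·)) = pvSegProc (pvStepB buf a) segs := by
  cases segs with
  | nil => rfl
  | cons seg rest => simp [pvSegProc, List.foldl_cons]

-- A's character loop + final flush, expressed through B's segment processing
theorem pv_main (l : List Char) (buf : List Char) (cmds : List (List Char)) :
    (if PySem.Chars.strip (l.foldl pvStepA (buf, cmds)).1 ≠ [] then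
        (l.foldl pvStepA (buf, cmds)).2 ++ [PySem.Chars.strip (l.foldl pvStepA (buf, cmds)).1]
      else (l.foldl pvStepA (buf, cmds)).2)
      = cmds ++ pvSegProc buf (List.splitOn '\n' (l.map pvRepl)) := by
  induction l generalizing buf cmds with
  | nil =>
    simp only [List.foldl_nil, List.map_nil]
    show _ = cmds ++ pvSegProc buf [[]]
    simp only [pvSegProc, List.foldl_nil, pvOpt, List.append_nil]
    split_ifs <;> simp
  | cons a as ih =>
    by_cases hterm : a = '\r' ∨ a = '\n'
    · have hrepl : pvRepl a = '\n' := by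
        rcases hterm with h | h <;> simp [pvRepl, h]
      simp only [List.foldl_cons, List.map_cons, hrepl, pv_splitOn_cons_sep]
      rw [show pvStepA (buf, cmds) a
            = ([], if PySem.Chars.strip buf ≠ [] then cmds ++ [PySem.Chars.strip buf] else cmds) by
          simp [pvStepA, hterm]]
      rw [ih]
      simp only [pvSegProc, List.foldl_nil]
      unfold pvOpt
      split_ifs <;> simp
    · have hrepl : pvRepl a = a := by
        simp only [pvRepl]
        rw [if_neg]
        intro h; exact hterm (Or.inl h)
      have hne : ¬ a = '\n' := fun h => hterm (Or.inr h)
      simp only [List.foldl_cons, List.map_cons, hrepl, pv_splitOn_cons_ne a _ hne,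
        pv_segProc_modifyHead]
      rw [show pvStepA (buf, cmds) a = (pvStepB buf a, cmds) by
          simp only [pvStepA, pvStepB, hterm, ite_false]
          split_ifs <;> rfl]
      exact ih _ _
    -- note: the `a = '\x7f'` and ordinary-char branches of pvStepA/pvStepB coincide via pvStepB

-- A's event loop equals the character fold over the concatenated stream
theorem pv_flat (events : List (List String)) (st : List Char × List (List Char)) :
    events.foldl (fun st event =>
      if event.length ≠ 3 ∨ PySem.List.pyGet? event 1 ≠ some "i" then st
      else (((PySem.List.pyGet? event 2).getD "").toList).foldl pvStepA st) st
    = (pvStream events).foldl pvStepA st := by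
  induction events generalizing st with
  | nil => simp [pvStream]
  | cons e rest ih =>
    by_cases h : e.length = 3 ∧ PySem.List.pyGet? e 1 = some "i"
    · have hng : ¬ (e.length ≠ 3 ∨ PySem.List.pyGet? e 1 ≠ some "i") := by
        push_neg; exact ⟨h.1, h.2⟩
      have hs : pvStream (e :: rest) = ((PySem.List.pyGet? e 2).getD "").toList ++ pvStream rest := by
        simp only [pvStream, List.filter_cons]
        have h1 : e[1] = "i" := by
          have h2 := h.2
          simp [PySem.List.pyGet?, PySem.List.pyIdx?, h.1] at h2
          exact h2
        rw [if_pos (by simp [h.1, h1])]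
        rfl
      simp only [List.foldl_cons, hng, ite_false, ih, hs, List.foldl_append]
    · have : e.length ≠ 3 ∨ PySem.List.pyGet? e 1 ≠ some "i" := by
        by_contra hc; push_neg at hc; exact h ⟨hc.1, hc.2⟩
      simp only [List.foldl_cons, this, ite_true, ih]
      simp [pvStream, List.filter_cons, h]

-- B's foldl over segments equals pvSegProc with empty carry-in
theorem pv_foldB (segs : List (List Char)) (cmds0 : List (List Char)) :
    segs.foldl (fun cmds seg =>
      let cmd := PySem.Chars.strip (seg.foldl pvStepB [])
      if cmd ≠ [] then cmds ++ [cmd] else cmds) cmds0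
    = cmds0 ++ pvSegProc [] segs := by
  induction segs generalizing cmds0 with
  | nil => simp [pvSegProc]
  | cons seg rest ih =>
    simp only [List.foldl_cons, ih, pvSegProc, pvOpt]
    split_ifs <;> simp

-- ===== VERDICT (by name: the statement is the Claim_ definition above) =====
theorem extract_via_input_events_spec : Claim_equal_extract_via_input_events := by
  intro events _
  unfold Spec_extract_via_input_events extract_via_input_events extract_via_input_events_alt
  simp only [pv_flat events ([], []), pv_foldB, List.nil_append, pv_main, pvStream]
  rfl
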